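-- pv_equiv track=rewrite | github.com/DouglasBarbino/MatComp_UFSCar | T5/ClassificadorPadroes.py | dividePorClasse
-- ===== SOURCE A (Python) =====
-- def dividePorClasse(dataset, atributoClasse):
--     #Cria um conjunto onde ficarao as classes divididas
--     divisaoClasses = {}
--     #Variavel onde se armazena o numero de classes possiveis para futuro controle da matriz de covariancia e da media
--     nroClassesPossiveis = 0
--     for i in range(len(dataset)):
--         #guarda a instancia verificada naquele momento
--         instancia = dataset[i]
--         #Encontrou classe nova, cria um indice para ela
--         if (instancia[atributoClasse] not in divisaoClasses):
--             divisaoClasses[instancia[atributoClasse]] = []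
--             nroClassesPossiveis += 1
--         #Adiciona na classe correspondente a instancia verififcada
--         divisaoClasses[instancia[atributoClasse]].append(instancia)
--     return divisaoClasses, nroClassesPossiveis
-- ===== SOURCE B (Python) =====
-- def dividePorClasse(dataset, atributoClasse):
--     # first-appearance-ordered distinct class values, then one filtering pass per class
--     chaves = list(dict.fromkeys(instancia[atributoClasse] for instancia in dataset))
--     divisao = {c: [instancia for instancia in dataset if instancia[atributoClasse] == c]
--                for c in chaves}
--     return divisao, len(chaves)
-- ===== Notes on version B (the rewrite author's own statement) =====
-- stated objective: alternative
-- what changed: Instead of one stateful pass growing a dict and a counter, B first computes the distinct class values in first-appearance order via dict.fromkeys, then builds each group by an independent filtering pass over the dataset, and returns the length of the key list as the count.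
import Mathlib
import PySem

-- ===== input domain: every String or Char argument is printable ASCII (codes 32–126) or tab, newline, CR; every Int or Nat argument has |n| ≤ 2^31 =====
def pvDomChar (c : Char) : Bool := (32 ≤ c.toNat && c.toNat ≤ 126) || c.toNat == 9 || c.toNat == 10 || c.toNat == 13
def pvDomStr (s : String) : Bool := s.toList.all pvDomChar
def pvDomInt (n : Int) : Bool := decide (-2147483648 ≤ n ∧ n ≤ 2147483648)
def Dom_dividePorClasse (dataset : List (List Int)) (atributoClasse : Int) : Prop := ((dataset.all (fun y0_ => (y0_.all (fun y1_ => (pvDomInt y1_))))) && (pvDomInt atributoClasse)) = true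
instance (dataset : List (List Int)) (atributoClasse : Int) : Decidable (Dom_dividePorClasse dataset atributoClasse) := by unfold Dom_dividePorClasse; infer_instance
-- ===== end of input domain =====

-- B replaces A's single dict-building pass by computing the distinct class values first and
-- one filtering pass per class; same return value, no speed claim. A mutates nothing.

-- ===== PORT A =====
-- one stateful pass: for i in range(len(dataset)): grow dict / bump counter, then append
def dividePorClasse (dataset : List (List Int)) (atributoClasse : Int) : (List (Int × List (List Int))) × Int :=
  let fin := (PySem.List.pyRange 0 (PySem.List.len dataset)).foldl
    (fun (st : PySem.Dict Int (List (List Int)) × Int) (i : Int) =>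
      let instancia := PySem.List.pyGetD dataset i []
      let k := PySem.List.pyGetD instancia atributoClasse 0   -- instancia[atributoClasse]; Pre_ keeps it in range
      let st1 := if st.1.contains k then st else (st.1.insert k [], st.2 + 1)
      (st1.1.modify k [] (fun l => l ++ [instancia]), st1.2))
    (PySem.Dict.empty, 0)
  (fin.1.items, fin.2)

-- ===== PORT B =====
-- distinct keys in first-appearance order, then a filtering pass per key
def dividePorClasse_alt (dataset : List (List Int)) (atributoClasse : Int) : (List (Int × List (List Int))) × Int :=
  let chaves := PySem.List.dedup (dataset.map (fun instancia => PySem.List.pyGetD instancia atributoClasse 0))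
  (chaves.map (fun c => (c, dataset.filter (fun instancia => PySem.List.pyGetD instancia atributoClasse 0 == c))),
   PySem.List.len chaves)

-- ===== PRECONDITION & SPEC =====
-- excludes exactly the inputs where instancia[atributoClasse] raises IndexError in A (and in B)
def Pre_dividePorClasse (dataset : List (List Int)) (atributoClasse : Int) : Prop :=
  ∀ row ∈ dataset, PySem.Raise.InRange row.length atributoClasse
instance (dataset : List (List Int)) (atributoClasse : Int) : Decidable (Pre_dividePorClasse dataset atributoClasse) := by unfold Pre_dividePorClasse; infer_instance
def pvWitness_dividePorClasse : List (List Int) × Int := ([[1, 2], [3, 2], [4, 5]], 1)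
def Spec_dividePorClasse (dataset : List (List Int)) (atributoClasse : Int) (out : (List (Int × List (List Int))) × Int) : Prop := out = dividePorClasse_alt dataset atributoClasse
instance (dataset : List (List Int)) (atributoClasse : Int) (out : (List (Int × List (List Int))) × Int) : Decidable (Spec_dividePorClasse dataset atributoClasse out) := by unfold Spec_dividePorClasse; infer_instance

-- ===== CLAIM (what is proved, stated in full; the proofs are below) =====
def Claim_equal_dividePorClasse : Prop := ∀ (dataset : List (List Int)) (atributoClasse : Int), Dom_dividePorClasse dataset atributoClasse → Pre_dividePorClasse dataset atributoClasse → Spec_dividePorClasse dataset atributoClasse (dividePorClasse dataset atributoClasse)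

-- ===== LEMMAS AND PROOFS =====

-- the key of a row, as both ports compute it
def pvKey (a : Int) (instancia : List Int) : Int := PySem.List.pyGetD instancia a 0

-- the dict-only loop A's stateful loop is shown equal to
def pvStepM (a : Int) (d : PySem.Dict Int (List (List Int))) (instancia : List Int) : PySem.Dict Int (List (List Int)) :=
  d.modify (pvKey a instancia) [] (fun l => l ++ [instancia])

-- A's guarded insert followed by modify collapses to a bare modify
theorem pvStep_collapse (a : Int) (d : PySem.Dict Int (List (List Int))) (c : Int) (x : List Int) :
    (let k := pvKey a x
     let st1 := if d.contains k then ((d, c) : PySem.Dict Int (List (List Int)) × Int) else (d.insert k [], c + 1)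
     (st1.1.modify k [] (fun l => l ++ [x]), st1.2))
    = (pvStepM a d x, if d.contains (pvKey a x) then c else c + 1) := by
  by_cases h : d.contains (pvKey a x) = true
  · simp only [h, if_true]
    rfl
  · simp only [Bool.not_eq_true] at h
    simp only [h, Bool.false_eq_true, if_false]
    refine congrArg (fun d' => (d', c + 1)) ?_
    simp [PySem.Dict.modify, PySem.Dict.getD_insert_self, PySem.Dict.insert_insert_self,
      PySem.Dict.getD_of_not_contains d _ h, pvStepM]

-- the loop invariant: A's fold = (modify-only fold, counter tracking the number of keys)
theorem pvLoop_eq (a : Int) (l : List (List Int)) (d : PySem.Dict Int (List (List Int))) (c : Int) :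
    l.foldl (fun (st : PySem.Dict Int (List (List Int)) × Int) (x : List Int) =>
        let k := pvKey a x
        let st1 := if st.1.contains k then st else (st.1.insert k [], st.2 + 1)
        (st1.1.modify k [] (fun l => l ++ [x]), st1.2)) (d, c)
    = (l.foldl (pvStepM a) d,
       c + ((l.foldl (pvStepM a) d).keys.length : Int) - (d.keys.length : Int)) := by
  induction l generalizing d c with
  | nil => simp
  | cons x l ih =>
    simp only [List.foldl_cons]
    rw [pvStep_collapse a d c x]
    rw [ih]
    simp only [Prod.mk.injEq]
    refine ⟨trivial, ?_⟩
    by_cases h : d.contains (pvKey a x) = true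
    · have hk : (pvStepM a d x).keys.length = d.keys.length := by
        simp [pvStepM, PySem.Dict.keys_modify, PySem.Dict.keys_insert_of_contains d _ h]
      rw [if_pos h, hk]
    · simp only [Bool.not_eq_true] at h
      have hk : (pvStepM a d x).keys.length = d.keys.length + 1 := by
        simp [pvStepM, PySem.Dict.keys_modify, PySem.Dict.keys_insert_of_not_contains d _ h]
      rw [if_neg (by simp [h]), hk]
      push_cast
      ring

-- ===== VERDICT (by name: the statement is the Claim_ definition above) =====
theorem dividePorClasse_spec : Claim_equal_dividePorClasse := by
  intro dataset a _ _
  unfold Spec_dividePorClasse dividePorClasse dividePorClasse_alt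
  -- the index loop is a loop over the rows themselves
  have hrows : (PySem.List.pyRange 0 (PySem.List.len dataset)).foldl
      (fun (st : PySem.Dict Int (List (List Int)) × Int) (i : Int) =>
        let instancia := PySem.List.pyGetD dataset i []
        let k := PySem.List.pyGetD instancia a 0
        let st1 := if st.1.contains k then st else (st.1.insert k [], st.2 + 1)
        (st1.1.modify k [] (fun l => l ++ [instancia]), st1.2))
      (PySem.Dict.empty, 0)
      = dataset.foldl (fun (st : PySem.Dict Int (List (List Int)) × Int) (x : List Int) =>
        let k := pvKey a x
        let st1 := if st.1.contains k then st else (st.1.insert k [], st.2 + 1)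
        (st1.1.modify k [] (fun l => l ++ [x]), st1.2)) (PySem.Dict.empty, 0) := by
    conv_rhs => rw [← PySem.List.map_pyGetD_pyRange_zero dataset []]
    rw [List.foldl_map]
    rfl
  rw [hrows, pvLoop_eq]
  have hM := fun (d : PySem.Dict Int (List (List Int))) =>
    PySem.Dict.keys_foldl_modify_key dataset (pvKey a) ([] : List (List Int))
      (fun _ x l => l ++ [x]) d
  have hkeys : (dataset.foldl (pvStepM a) PySem.Dict.empty).keys
      = PySem.List.dedup (dataset.map (fun instancia => PySem.List.pyGetD instancia a 0)) := by
    rw [show (pvStepM a) = (fun d x => d.modify (pvKey a x) [] ((fun _ x l => l ++ [x]) d x)) from rfl]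
    rw [hM]
    simp only [PySem.List.dedup_eq_ofList, PySem.Set.ofList, PySem.Set.update, PySem.Dict.keys_empty]
    rfl
  have hnd : (dataset.foldl (pvStepM a) PySem.Dict.empty).keys.Nodup := by
    rw [show (pvStepM a) = (fun d x => d.modify (pvKey a x) [] ((fun _ x l => l ++ [x]) d x)) from rfl]
    exact PySem.Dict.nodup_keys_foldl_modify_key _ _ _ _ _ PySem.Dict.nodup_keys_empty
  have hgetD : ∀ c : Int, (dataset.foldl (pvStepM a) PySem.Dict.empty).getD c []
      = dataset.filter (fun instancia => PySem.List.pyGetD instancia a 0 == c) := by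
    intro c
    have : dataset.foldl (pvStepM a) PySem.Dict.empty
        = (dataset.map (fun i => (pvKey a i, i))).foldl
            (fun d p => d.modify p.1 [] (fun l => l ++ [p.2])) PySem.Dict.empty := by
      rw [List.foldl_map]; rfl
    rw [this, PySem.Dict.getD_foldl_modify_append]
    simp [List.filter_map, Function.comp_def, List.map_map, pvKey]
  refine Prod.ext ?_ ?_
  · show (dataset.foldl (pvStepM a) PySem.Dict.empty).items = _
    rw [PySem.Dict.items_eq_map_keys _ hnd ([] : List (List Int)), hkeys]
    refine List.map_congr_left ?_
    intro c _
    rw [← hkeys] at *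
    simp [hgetD c]
  · show 0 + ((dataset.foldl (pvStepM a) PySem.Dict.empty).keys.length : Int) - 0 = _
    have : (dataset.foldl (pvStepM a) PySem.Dict.empty).keys.length
        = (PySem.List.dedup (dataset.map (fun instancia => PySem.List.pyGetD instancia a 0))).length := by
      rw [hkeys]
    simp [PySem.List.len, this]
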